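-- pv_equiv track=rewrite | github.com/kevingtzz/ST0245-033 | laboratorios/lab03/ejercicioEnLinea/Online.py | start_end
-- ===== SOURCE A (Python) =====
-- def start_end(str):
--     """
--     This function reorders the string, correcting the errors caused by
--     the expressions '[' and ']' that symbolize the
--     "start" and "end" keys on a conventional keyboard.
--
--     Args:
--         str (str): any text to reorder
--     returns:
--         nstr (str): The text reordered
--     """
--     start = True
--     index = 0
--     lstr  = []
--     nstr  = ""
--     for char in str:
--         if char == '[':
--             start = True
--             index = 0
--             continue
--         elif char == ']':
--             start = False
--             continue
--         elif char != '[' and char != ']':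
--             if start:
--                 lstr.insert(index , char)
--                 index += 1
--             else:
--                 lstr.append(char)
--     for letter in lstr:
--         nstr += letter
--     return nstr
-- ===== SOURCE B (Python) =====
-- def start_end(str):
--     """Single-pass O(n): collect front blocks (joined in reverse block order) and back text."""
--     fronts = []
--     back = []
--     cur = []
--     front = True
--     for ch in str:
--         if ch == '[' or ch == ']':
--             if front:
--                 fronts.append(cur)
--             else:
--                 back.extend(cur)
--             cur = []
--             front = (ch == '[')
--         else:
--             cur.append(ch)
--     if front:
--         fronts.append(cur)
--     else:
--         back.extend(cur)
--     return ''.join(''.join(b) for b in reversed(fronts)) + ''.join(back)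
-- ===== Notes on version B (the rewrite author's own statement) =====
-- stated objective: faster
-- what changed: A rebuilds the list with list.insert at a moving front index on every home-mode character (each insert shifts the tail); B makes a single pass collecting whole front blocks and back text, then joins the front blocks in reverse block order followed by the back text.
import Mathlib
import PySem

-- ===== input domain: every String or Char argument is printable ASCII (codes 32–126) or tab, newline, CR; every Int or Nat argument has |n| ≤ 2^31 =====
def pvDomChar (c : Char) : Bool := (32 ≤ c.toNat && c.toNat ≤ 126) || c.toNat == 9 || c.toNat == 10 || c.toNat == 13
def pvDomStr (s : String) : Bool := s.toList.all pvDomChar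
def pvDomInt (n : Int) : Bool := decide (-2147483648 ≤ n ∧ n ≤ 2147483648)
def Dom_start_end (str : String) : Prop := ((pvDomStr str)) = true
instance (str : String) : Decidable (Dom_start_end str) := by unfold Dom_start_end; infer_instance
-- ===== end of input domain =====

-- B replaces A's O(n²) front-insertions with a single pass collecting front/back blocks joined at the end (asymptotically faster); return value only, no observable mutation.

-- ===== PORT A =====
-- state: (start, index, lstr), exactly A's loop variables
def start_end_stepA (st : Bool × Int × List Char) (c : Char) : Bool × Int × List Char :=
  if c = '[' then (true, 0, st.2.2)
  else if c = ']' then (false, st.2.1, st.2.2)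
  else if st.1 then (st.1, st.2.1 + 1, PySem.List.insert st.2.2 st.2.1 c)
  else (st.1, st.2.1, st.2.2 ++ [c])

def start_end (str : String) : String :=
  let st := str.toList.foldl start_end_stepA (true, 0, [])
  -- for letter in lstr: nstr += letter
  st.2.2.foldl (fun s c => s.push c) ""

-- ===== PORT B =====
-- state: (fronts, back, cur, front)
def start_end_stepB (st : List (List Char) × List Char × List Char × Bool) (c : Char) :
    List (List Char) × List Char × List Char × Bool :=
  if c = '[' ∨ c = ']' then
    if st.2.2.2 then (st.1 ++ [st.2.2.1], st.2.1, [], c = '[')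
    else (st.1, st.2.1 ++ st.2.2.1, [], c = '[')
  else (st.1, st.2.1, st.2.2.1 ++ [c], st.2.2.2)

def start_end_alt (str : String) : String :=
  let st := str.toList.foldl start_end_stepB ([], [], [], true)
  let fronts := if st.2.2.2 then st.1 ++ [st.2.2.1] else st.1
  let back := if st.2.2.2 then st.2.1 else st.2.1 ++ st.2.2.1
  -- ''.join(''.join(b) for b in reversed(fronts)) + ''.join(back)
  String.ofList (fronts.reverse.flatMap id ++ back)

-- ===== PRECONDITION & SPEC =====
def Spec_start_end (str : String) (out : String) : Prop := out = start_end_alt str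
instance (str : String) (out : String) : Decidable (Spec_start_end str out) := by unfold Spec_start_end; infer_instance

-- ===== CLAIM (what is proved, stated in full; the proofs are below) =====
def Claim_equal_start_end : Prop := ∀ (str : String), Dom_start_end str → Spec_start_end str (start_end str)

-- ===== LEMMAS AND PROOFS =====

-- invariant tying A's (start, index, lstr) to B's (fronts, back, cur, front)
def start_end_Inv (a : Bool × Int × List Char) (b : List (List Char) × List Char × List Char × Bool) : Prop :=
  a.1 = b.2.2.2 ∧
  (if b.2.2.2 then
    a.2.1 = (b.2.2.1.length : Int) ∧ a.2.2 = b.2.2.1 ++ b.1.reverse.flatMap id ++ b.2.1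
   else
    a.2.2 = b.1.reverse.flatMap id ++ b.2.1 ++ b.2.2.1)

set_option maxRecDepth 4096 in
lemma start_end_step_inv (a : Bool × Int × List Char)
    (b : List (List Char) × List Char × List Char × Bool) (c : Char)
    (h : start_end_Inv a b) : start_end_Inv (start_end_stepA a c) (start_end_stepB b c) := by
  obtain ⟨a1, a2, a3⟩ := a
  obtain ⟨f, bk, cur, fr⟩ := b
  simp only [start_end_Inv] at h ⊢
  by_cases hc : c = '[' ∨ c = ']'
  · -- bracket: both programs flush; B's new block layout matches A's list
    simp only [start_end_stepB, if_pos hc]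
    rcases hc with hc | hc <;> subst hc <;> cases fr <;>
      simp only [start_end_stepA, reduceIte, if_true, if_false, Bool.false_eq_true,
        reduceCtorEq] at h ⊢ <;>
      simp [h, List.flatMap_append, List.append_assoc]
  · rw [not_or] at hc
    simp only [start_end_stepA, start_end_stepB, if_neg hc.1, if_neg hc.2, if_neg (by tauto : ¬(c = '[' ∨ c = ']'))]
    cases fr <;> simp_all only [if_true, if_false, Bool.false_eq_true, if_pos, if_neg]
    · simp [h.2, List.append_assoc]
    · obtain ⟨h1, h2, h3⟩ := h
      subst h1 h2 h3
      refine ⟨by simp, by simp, ?_⟩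
      rw [show ((cur.length : Int)) = ((cur.length : Nat) : Int) from rfl,
        PySem.List.insert_natCast _ _ _ (by simp)]
      simp [List.append_assoc]

lemma start_end_loop_inv (l : List Char) (a : Bool × Int × List Char)
    (b : List (List Char) × List Char × List Char × Bool)
    (h : start_end_Inv a b) :
    start_end_Inv (l.foldl start_end_stepA a) (l.foldl start_end_stepB b) := by
  induction l generalizing a b with
  | nil => exact h
  | cons c l ih => exact ih _ _ (start_end_step_inv a b c h)

lemma foldl_push_toList (l : List Char) (s : String) :
    (l.foldl (fun s c => s.push c) s).toList = s.toList ++ l := by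
  induction l generalizing s with
  | nil => simp
  | cons c l ih => simp [ih, String.toList_push]

-- ===== VERDICT (by name: the statement is the Claim_ definition above) =====
theorem start_end_spec : Claim_equal_start_end := by
  intro str _
  unfold Spec_start_end start_end start_end_alt
  have h := start_end_loop_inv str.toList (true, 0, []) ([], [], [], true)
    (by simp [start_end_Inv])
  set a := str.toList.foldl start_end_stepA (true, 0, [])
  set b := str.toList.foldl start_end_stepB ([], [], [], true)
  simp only [start_end_Inv] at h
  apply String.toList_inj.mp
  rw [foldl_push_toList]
  cases hfr : b.2.2.2 <;> simp only [hfr, if_true, if_false, Bool.false_eq_true] at h ⊢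
  · simp [h.2, List.flatMap_append, List.append_assoc]
  · simp [h.2.2, List.flatMap_append, List.append_assoc]
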